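-- pv_equiv track=rewrite | github.com/samghelms/similar_eqs_senior_proj | common/heuristics.py | high_level_only
-- ===== SOURCE A (Python) =====
-- l_dep_chars = ['{', '[', '(', '<', '\\langle',
--                '\\{', '\\lfloor', '\\lceil']
--
-- r_dep_chars = ['}', ')', ']', '>', '\\rangle'
--                '\\}', '\\rfloor', '\\rceil']
--
-- def high_level_only(s):
--     """@ params s: str
--        @ returns sring with only high level chars left (not
--        within {})"""
--     dep_depth = 0
--     prev_idx = 0
--     curr = ""
--     prev_c = "x"
--     supsub = "^_"
--     for c in s:
--         if c in l_dep_chars: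
--             dep_depth += 1
--         elif c in r_dep_chars:
--             dep_depth -= 1
--         else:
--             if dep_depth == 0 and prev_c not in supsub\
--                               and c not in supsub:
--                 curr += c
--         prev_c = c
--     if(dep_depth != 0):
--         return None
--
--     return curr
-- ===== SOURCE B (Python) =====
-- from itertools import accumulate
--
-- def high_level_only(s):
--     """Same result as A by a different decomposition: precompute per-char bracket
--     deltas and a prefix-depth table, then keep chars in one zip pass."""
--     deltas = [1 if c in '{[(<' else -1 if c in '}])>' else 0 for c in s]
--     depths = list(accumulate(deltas, initial=0))  # depth before each char
--     if depths[-1] != 0: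
--         return None
--     return ''.join(c for c, d, dep, p in zip(s, deltas, depths, 'x' + s)
--                    if d == 0 and dep == 0 and p not in '^_' and c not in '^_')
-- ===== Notes on version B (the rewrite author's own statement) =====
-- stated objective: alternative
-- what changed: Replaces A's single stateful loop (mutable depth/prev state, string concatenation) with a two-phase decomposition: a precomputed per-char delta list and prefix-depth table via itertools.accumulate, then one zip comprehension joined into the result.
import Mathlib
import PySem

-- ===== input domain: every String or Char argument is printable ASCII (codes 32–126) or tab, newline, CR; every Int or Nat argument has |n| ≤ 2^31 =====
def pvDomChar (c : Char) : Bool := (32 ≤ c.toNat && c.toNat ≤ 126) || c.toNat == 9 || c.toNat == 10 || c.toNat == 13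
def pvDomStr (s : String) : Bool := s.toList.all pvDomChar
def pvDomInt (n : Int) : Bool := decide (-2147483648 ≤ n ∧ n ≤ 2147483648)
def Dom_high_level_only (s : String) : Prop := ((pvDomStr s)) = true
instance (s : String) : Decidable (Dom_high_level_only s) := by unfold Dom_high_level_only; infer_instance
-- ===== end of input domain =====

-- B replaces A's single stateful loop by a prefix-depth table plus one zip pass; same cost, different decomposition.

-- ===== PORT A =====
-- the multi-char entries of l_dep_chars/r_dep_chars can never equal a single char,
-- so membership of a char reduces to these single-char lists (incl. A's '\\rangle\\}' typo)
def pvStepA (st : Int × List Char × Char) (c : Char) : Int × List Char × Char :=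
  let (dep, curr, prev) := st
  if c ∈ ['{', '[', '(', '<'] then (dep + 1, curr, c)
  else if c ∈ ['}', ')', ']', '>'] then (dep - 1, curr, c)
  else if dep = 0 ∧ prev ∉ ['^', '_'] ∧ c ∉ ['^', '_'] then (dep, curr ++ [c], c)
  else (dep, curr, c)

def high_level_only (s : String) : Option String :=
  let r := s.toList.foldl pvStepA (0, [], 'x')
  if r.1 ≠ 0 then none else some (String.ofList r.2.1)

-- ===== PORT B =====
def pvDelta (c : Char) : Int :=
  if c ∈ ['{', '[', '(', '<'] then 1 else if c ∈ ['}', ')', ']', '>'] then -1 else 0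

-- the zip comprehension of Source B (zip truncates at the shortest list = s itself)
def pvKeepZip : List Char → List Int → List Int → List Char → List Char
  | c :: cs, d :: ds, dep :: deps, p :: ps =>
      (if d = 0 ∧ dep = 0 ∧ p ∉ ['^', '_'] ∧ c ∉ ['^', '_'] then [c] else [])
        ++ pvKeepZip cs ds deps ps
  | _, _, _, _ => []

def high_level_only_alt (s : String) : Option String :=
  let cs := s.toList
  let deltas := cs.map pvDelta
  let depths := deltas.scanl (· + ·) 0
  if depths.getLastD 0 ≠ 0 then none
  else some (String.ofList (pvKeepZip cs deltas depths ('x' :: cs)))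

-- ===== PRECONDITION & SPEC =====
def Spec_high_level_only (s : String) (out : Option String) : Prop := out = high_level_only_alt s
instance (s : String) (out : Option String) : Decidable (Spec_high_level_only s out) := by unfold Spec_high_level_only; infer_instance

-- ===== CLAIM (what is proved, stated in full; the proofs are below) =====
def Claim_equal_high_level_only : Prop := ∀ (s : String), Dom_high_level_only s → Spec_high_level_only s (high_level_only s)

-- ===== LEMMAS AND PROOFS =====

-- characterisation of the kept characters, shared shape for both proofs
def pvKeep (dep : Int) (prev : Char) : List Char → List Char
  | [] => []
  | c :: cs =>
      (if pvDelta c = 0 ∧ dep = 0 ∧ prev ∉ ['^', '_'] ∧ c ∉ ['^', '_'] then [c] else [])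
        ++ pvKeep (dep + pvDelta c) c cs

lemma foldA_eq (cs : List Char) (dep : Int) (acc : List Char) (prev : Char) :
    cs.foldl pvStepA (dep, acc, prev)
      = (dep + (cs.map pvDelta).sum, acc ++ pvKeep dep prev cs, cs.getLastD prev) := by
  induction cs generalizing dep acc prev with
  | nil => simp [pvKeep]
  | cons c cs ih =>
    simp only [List.foldl_cons, pvStepA, List.map_cons, List.sum_cons, List.getLastD_cons]
    split_ifs with h1 h2 h3
    · have hd : pvDelta c = 1 := by simp [pvDelta, h1]
      have hk : pvKeep dep prev (c :: cs) = pvKeep (dep + 1) c cs := by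
        simp only [pvKeep, hd]
        rw [if_neg (by simp)]
        simp
      rw [ih, hd, hk]
      simp only [Prod.mk.injEq, and_true]
      try ring
    · have hd : pvDelta c = -1 := by simp [pvDelta, h1, h2]
      have hk : pvKeep dep prev (c :: cs) = pvKeep (dep - 1) c cs := by
        simp only [pvKeep, hd]
        rw [if_neg (by simp), (by ring : dep + (-1 : Int) = dep - 1)]
        simp
      rw [ih, hd, hk]
      simp only [Prod.mk.injEq, and_true]
      try ring
    · have hd : pvDelta c = 0 := by simp [pvDelta, h1, h2]
      have hk : pvKeep dep prev (c :: cs) = c :: pvKeep dep c cs := by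
        simp only [pvKeep, hd]
        rw [if_pos ⟨trivial, h3⟩]
        simp
      rw [ih, hd, hk]
      simp only [Prod.mk.injEq, List.append_assoc, List.singleton_append, and_true]
      try ring
    · have hd : pvDelta c = 0 := by simp [pvDelta, h1, h2]
      have hk : pvKeep dep prev (c :: cs) = pvKeep dep c cs := by
        simp only [pvKeep, hd]
        rw [if_neg (fun h => h3 h.2)]
        simp
      rw [ih, hd, hk]
      simp only [Prod.mk.injEq, and_true]
      try ring

lemma keepZip_eq (cs : List Char) (dep : Int) (prev : Char) :
    pvKeepZip cs (cs.map pvDelta) ((cs.map pvDelta).scanl (· + ·) dep) (prev :: cs)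
      = pvKeep dep prev cs := by
  induction cs generalizing dep prev with
  | nil => simp [pvKeepZip, pvKeep]
  | cons c cs ih =>
    simp only [List.map_cons, List.scanl_cons, pvKeepZip, pvKeep, ih]

lemma getLastD_scanl_add (ds : List Int) (dep e : Int) :
    (ds.scanl (· + ·) dep).getLastD e = dep + ds.sum := by
  induction ds generalizing dep e with
  | nil => simp
  | cons d ds ih =>
    rw [List.scanl_cons, List.getLastD_cons, ih, List.sum_cons]
    ring

-- ===== VERDICT (by name: the statement is the Claim_ definition above) =====
theorem high_level_only_spec : Claim_equal_high_level_only := by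
  intro s _
  unfold Spec_high_level_only high_level_only high_level_only_alt
  simp only [foldA_eq, keepZip_eq, getLastD_scanl_add, zero_add, List.nil_append]
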